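-- pv_equiv track=rewrite | github.com/CypriumCuprum/AI_Contest_2023 | for_final/agent/Agent.py | get_para_from_state
-- ===== SOURCE A (Python) =====
-- def get_para_from_state(board):
--     heights = []
--     holes = []
--     for row in range(len(board)):
--         for col in range(len(board[0])):
--             if board[row][col] == 1:
--                 heights.append(len(board)-col)
--                 n_hol_in_col = 0
--                 for cell in board[0][col+1:]:
--                     if cell == 1:
--                         n_hol_in_col += 1
--                 holes.append(n_hol_in_col)
--                 break
--
--     # height sum
--     height_sum = sum(heights)
--
--     # diff sum
--     diff_sum = 0
--     for i in range(1, len(heights)):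
--         diff_sum += abs(heights[i] - heights[i-1])
--
--     # height max
--     max_height = max(heights)
--
--     # holes sum
--     hole_sum = sum(holes)
--     return height_sum, diff_sum, max_height, hole_sum
-- ===== SOURCE B (Python) =====
-- def get_para_from_state(board):
--     R = len(board)
--     row0 = board[0]
--     C = len(row0)
--     # suffix[c] = number of 1-cells in row0[c:]; built once, right to left
--     suffix = [0] * (C + 1)
--     for c in range(C - 1, -1, -1):
--         suffix[c] = suffix[c + 1] + (1 if row0[c] == 1 else 0)
--     cols = []
--     for row in board:
--         for i, v in enumerate(row[:C]):
--             if v == 1: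
--                 cols.append(i)
--                 break
--     heights = [R - c for c in cols]
--     holes = [suffix[c + 1] for c in cols]
--     diff_sum = 0
--     for a, b in zip(heights, heights[1:]):
--         diff_sum += abs(b - a)
--     return sum(heights), diff_sum, max(heights), sum(holes)
-- ===== Notes on version B (the rewrite author's own statement) =====
-- stated objective: alternative
-- what changed: B precomputes a suffix table of 1-counts over board[0] once and looks each row's hole count up in O(1), replacing A's per-row rescan of board[0][col+1:], finds each row's first 1 by enumerating the row prefix, and computes the diff sum by zipping consecutive heights instead of index arithmetic.
import Mathlib
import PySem

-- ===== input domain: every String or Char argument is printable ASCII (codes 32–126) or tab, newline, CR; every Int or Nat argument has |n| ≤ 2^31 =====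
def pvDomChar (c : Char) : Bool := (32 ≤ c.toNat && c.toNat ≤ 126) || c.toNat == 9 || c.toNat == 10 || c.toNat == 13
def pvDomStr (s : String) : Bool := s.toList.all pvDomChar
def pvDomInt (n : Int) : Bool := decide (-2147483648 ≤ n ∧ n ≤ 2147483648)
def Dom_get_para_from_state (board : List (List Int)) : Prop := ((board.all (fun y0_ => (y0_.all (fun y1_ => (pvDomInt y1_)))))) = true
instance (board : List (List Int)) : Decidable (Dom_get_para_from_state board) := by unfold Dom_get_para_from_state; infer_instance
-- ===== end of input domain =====

-- B replaces A's per-row rescan of board[0][col+1:] with a one-time suffix count table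
-- over board[0]; return values agree on all of Pre_.

-- ===== PORT A =====

-- count of 1-cells in board[0][col+1:] (A's innermost loop)
def pvA_holeCount (cells : List Int) : Int :=
  cells.foldl (fun n cell => if cell == 1 then n + 1 else n) 0

-- A's inner 'for col in range(len(board[0])): if board[row][col]==1: … break' scan;
-- out-of-range lookup (Python IndexError) is read as a non-1 cell, outside Pre_
def pvA_findCol (r : List Int) : List Int → Option Int
  | [] => none
  | c :: cs => if (PySem.List.pyGet? r c).getD 0 = 1 then some c else pvA_findCol r cs

def pvA_step (R : Int) (row0 : List Int) (acc : List Int × List Int) (r : List Int) :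
    List Int × List Int :=
  match pvA_findCol r (PySem.List.pyRange 0 (row0.length : Int) 1) with
  | none => acc
  | some col =>
      (acc.1 ++ [R - col],
       acc.2 ++ [pvA_holeCount (PySem.List.slice row0 (some (col + 1)) none)])

def get_para_from_state (board : List (List Int)) : Int × Int × Int × Int :=
  let row0 := board.headD []   -- board[0]; empty board raises in Python, outside Pre_
  let st := List.foldl
      (fun acc j => pvA_step (board.length : Int) row0 acc (PySem.List.pyGetD board j []))
      ([], []) (PySem.List.pyRange 0 (board.length : Int) 1)
  let heights := st.1
  let holes := st.2
  let height_sum := heights.sum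
  let diff_sum := List.foldl
      (fun d i => d + |PySem.List.pyGetD heights i 0 - PySem.List.pyGetD heights (i - 1) 0|)
      0 (PySem.List.pyRange 1 (heights.length : Int) 1)
  -- max(heights): raises in Python on empty heights, outside Pre_
  let max_height := (PySem.List.max? heights (fun y => y)).getD 0
  (height_sum, diff_sum, max_height, holes.sum)

-- ===== PORT B =====

-- suffix[c] = number of 1-cells in row0[c:], built right-to-left
def pvB_suffix : List Int → List Int
  | [] => [0]
  | v :: rest =>
      let s := pvB_suffix rest
      ((if v == 1 then 1 else 0) + s.headD 0) :: s

-- index of the first 1 in a row prefix (enumerate + break)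
def pvB_first1 : List Int → Nat → Option Nat
  | [], _ => none
  | v :: rest, i => if v = 1 then some i else pvB_first1 rest (i + 1)

def pvB_cols (board : List (List Int)) (C : Nat) : List Nat :=
  board.filterMap (fun r => pvB_first1 (r.take C) 0)

def get_para_from_state_alt (board : List (List Int)) : Int × Int × Int × Int :=
  let R := (board.length : Int)
  let row0 := board.headD []   -- board[0]; empty board raises in Python, outside Pre_
  let C := row0.length
  let suffix := pvB_suffix row0
  let cols := pvB_cols board C
  let heights := cols.map (fun c => R - (c : Int))
  let holes := cols.map (fun c => suffix.getD (c + 1) 0)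
  let diff_sum := List.foldl (fun d p => d + |p.2 - p.1|) 0 (heights.zip heights.tail)
  (heights.sum, diff_sum, (PySem.List.max? heights (fun y => y)).getD 0, holes.sum)

-- ===== PRECONDITION & SPEC =====

-- Pre_ admits exactly the inputs where Python A returns: a non-empty board whose every row
-- either contains a 1 among its first len(board[0]) cells (the scan breaks) or is at least
-- len(board[0]) long (the scan ends without IndexError), with at least one row breaking
-- (else taking the max of the empty heights list raises ValueError).
def Pre_get_para_from_state (board : List (List Int)) : Prop :=
  board ≠ [] ∧
  (∀ r ∈ board, (1 : Int) ∈ r.take (board.headD []).length ∨ (board.headD []).length ≤ r.length) ∧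
  (∃ r ∈ board, (1 : Int) ∈ r.take (board.headD []).length)
instance (board : List (List Int)) : Decidable (Pre_get_para_from_state board) := by
  unfold Pre_get_para_from_state; infer_instance

def pvWitness_get_para_from_state : List (List Int) := [[0, 1], [1, 0]]

def Spec_get_para_from_state (board : List (List Int)) (out : Int × Int × Int × Int) : Prop :=
  out = get_para_from_state_alt board
instance (board : List (List Int)) (out : Int × Int × Int × Int) :
    Decidable (Spec_get_para_from_state board out) := by
  unfold Spec_get_para_from_state; infer_instance

-- ===== CLAIM (what is proved, stated in full; the proofs are below) =====
def Claim_equal_get_para_from_state : Prop := ∀ (board : List (List Int)),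
  Dom_get_para_from_state board → Pre_get_para_from_state board →
    Spec_get_para_from_state board (get_para_from_state board)

-- ===== LEMMAS AND PROOFS =====

lemma pv_holeCount_eq (l : List Int) : pvA_holeCount l = (l.countP (· == 1) : Int) := by
  simpa [pvA_holeCount] using PySem.List.foldl_count_if (· == 1) l 0

-- the suffix table entry k is A's hole count of row0[k:]
lemma pv_suffix_getD (l : List Int) : ∀ k : Nat,
    (pvB_suffix l).getD k 0 = pvA_holeCount (l.drop k) := by
  induction l with
  | nil => intro k; cases k <;> simp [pvB_suffix, pvA_holeCount]
  | cons v t ih =>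
    intro k
    cases k with
    | zero =>
      have hh : (pvB_suffix t).headD 0 = (pvB_suffix t).getD 0 0 := by
        cases h : pvB_suffix t <;> simp [List.getD]
      simp only [pvB_suffix, List.getD_cons_zero, hh, ih 0, List.drop_zero,
        pv_holeCount_eq, List.countP_cons]
      split <;> push_cast <;> ring
    | succ k => simpa [pvB_suffix] using ih k

-- A's index scan of a row finds the first 1 of the row's first-C prefix
lemma pv_find_eq (r : List Int) : ∀ (n i : Nat),
    pvA_findCol r (PySem.List.pyRange (i : Int) ((i : Int) + (n : Int)) 1) =
      (pvB_first1 ((r.drop i).take n) i).map (fun k => (k : Int)) := by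
  intro n
  induction n with
  | zero =>
    intro i
    rw [PySem.List.pyRange_one_eq_nil (by omega)]
    simp [pvA_findCol, pvB_first1]
  | succ n ih =>
    intro i
    rw [PySem.List.pyRange_one_cons (by push_cast; omega)]
    by_cases hi : i < r.length
    · have hdrop : r.drop i = r[i] :: r.drop (i + 1) := by
        exact (List.getElem_cons_drop hi).symm
      have hget : PySem.List.pyGet? r (i : Int) = some r[i] := by
        rw [PySem.List.pyGet?_natCast]; exact List.getElem?_eq_getElem hi
      by_cases h1 : r[i] = 1
      · simp [pvA_findCol, hget, h1, hdrop, pvB_first1]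
      · have : ((i : Int) + 1) = ((i + 1 : Nat) : Int) := by push_cast; ring
        have hrec := ih (i + 1)
        rw [pvA_findCol, hget]
        simp only [Option.getD_some, if_neg h1]
        rw [this]
        have : (i : Int) + (n + 1 : Nat) = ((i + 1 : Nat) : Int) + (n : Nat) := by
          push_cast; ring
        rw [this, hrec, hdrop, List.take_succ_cons]
        simp only [pvB_first1, if_neg h1]
    · have hget : PySem.List.pyGet? r (i : Int) = none := by
        rw [PySem.List.pyGet?_natCast]; exact List.getElem?_eq_none (by omega)
      have hd : r.drop i = [] := List.drop_eq_nil_of_le (by omega)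
      have hd1 : r.drop (i + 1) = [] := List.drop_eq_nil_of_le (by omega)
      rw [pvA_findCol, hget]
      simp only [Option.getD_none]
      rw [if_neg (by norm_num)]
      have : (i : Int) + 1 = ((i + 1 : Nat) : Int) := by push_cast; ring
      rw [this]
      have : (i : Int) + (n + 1 : Nat) = ((i + 1 : Nat) : Int) + (n : Nat) := by
        push_cast; ring
      rw [this, ih (i + 1), hd, hd1]
      simp [pvB_first1]

-- A's outer row loop produces exactly B's heights and holes lists
lemma pv_rows (R : Int) (row0 : List Int) : ∀ (bs : List (List Int)) (acc : List Int × List Int),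
    List.foldl (pvA_step R row0) acc bs =
      (acc.1 ++ (bs.filterMap (fun r => pvB_first1 (r.take row0.length) 0)).map
          (fun c => R - (c : Int)),
       acc.2 ++ (bs.filterMap (fun r => pvB_first1 (r.take row0.length) 0)).map
          (fun c => (pvB_suffix row0).getD (c + 1) 0)) := by
  intro bs
  induction bs with
  | nil => intro acc; simp
  | cons r t ih =>
    intro acc
    have hfind : pvA_findCol r (PySem.List.pyRange 0 (row0.length : Int) 1) =
        (pvB_first1 (r.take row0.length) 0).map (fun k => (k : Int)) := by
      simpa using pv_find_eq r row0.length 0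
    rw [List.foldl_cons]
    cases h : pvB_first1 (r.take row0.length) 0 with
    | none =>
      rw [show pvA_step R row0 acc r = acc by
        unfold pvA_step; rw [hfind, h]; rfl]
      simpa [h] using ih acc
    | some k =>
      have hstep : pvA_step R row0 acc r =
          (acc.1 ++ [R - (k : Int)],
           acc.2 ++ [(pvB_suffix row0).getD (k + 1) 0]) := by
        have hc : (k : Int) + 1 = ((k + 1 : Nat) : Int) := by push_cast; ring
        unfold pvA_step
        rw [hfind, h]
        change (acc.1 ++ [R - (k : Int)],
          acc.2 ++ [pvA_holeCount (PySem.List.slice row0 (some ((k : Int) + 1)))]) = _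
        rw [hc, PySem.List.slice_from_natCast, pv_suffix_getD row0 (k + 1)]
      rw [hstep, ih]
      simp [h]

-- A's index-difference loop is B's zip-with-tail loop
lemma pv_diff (h : List Int) :
    List.foldl
      (fun d i => d + |PySem.List.pyGetD h i 0 - PySem.List.pyGetD h (i - 1) 0|)
      0 (PySem.List.pyRange 1 (h.length : Int) 1) =
    List.foldl (fun d p => d + |p.2 - p.1|) 0 (h.zip h.tail) := by
  rw [PySem.List.foldl_add, PySem.List.foldl_add]
  congr 1
  refine congrArg List.sum ?_
  apply List.ext_getElem
  · simp [PySem.List.length_pyRange_one]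
  · intro k hk1 hk2
    simp only [List.getElem_map, PySem.List.getElem_pyRange_one]
    have hlen : k + 1 < h.length := by
      simp [PySem.List.length_pyRange_one] at hk1
      omega
    have e1 : (1 : Int) + (k : Int) = ((k + 1 : Nat) : Int) := by push_cast; ring
    rw [e1]
    rw [show ((k + 1 : Nat) : Int) - 1 = ((k : Nat) : Int) by omega]
    rw [PySem.List.pyGetD_natCast, PySem.List.pyGetD_natCast,
      List.getElem_zip, List.getElem_tail,
      List.getD_eq_getElem h 0 hlen, List.getD_eq_getElem h 0 (by omega)]

lemma pv_main (board : List (List Int)) :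
    get_para_from_state board = get_para_from_state_alt board := by
  unfold get_para_from_state get_para_from_state_alt pvB_cols
  dsimp only []
  rw [PySem.List.foldl_pyRange_zero_pyGetD' board ([] : List Int)
      (pvA_step (board.length : Int) (board.headD [])) (([], []) : List Int × List Int),
    pv_rows (board.length : Int) (board.headD []) board (([], []) : List Int × List Int)]
  simp only [List.nil_append]
  rw [pv_diff]

-- ===== VERDICT (by name: the statement is the Claim_ definition above) =====
theorem get_para_from_state_spec : Claim_equal_get_para_from_state := by
  intro board _ _
  unfold Spec_get_para_from_state
  exact pv_main board
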